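-- pv_equiv track=rewrite | github.com/TheCatOfHs/sccop | src/core/grid_generate.py | group_symm_sites
-- ===== SOURCE A (Python) =====
-- def group_symm_sites(mapping):
--     """
--     group sites by symmetry
--
--     Parameters
--     ----------
--     mapping [int, 2d]: mapping between DAU and all grid
--
--     Returns
--     ----------
--     symm_site [dict, int:list]: site position in DAU grouped by symmetry
--     """
--     symm = [len(i) for i in mapping]
--     last = symm[0]
--     store, symm_site = [], {}
--     for i, s in enumerate(symm):
--         if s == last:
--             store.append(i)
--         else:
--             symm_site[last] = store
--             store = []
--             last = s
--             store.append(i)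
--     symm_site[s] = store
--     return symm_site
-- ===== SOURCE B (Python) =====
-- def group_symm_sites(mapping):
--     symm = [len(row) for row in mapping]
--     symm_site = {}
--     idx = 0
--     n = len(symm)
--     while idx < n:
--         j = idx + 1
--         while j < n and symm[j] == symm[idx]:
--             j += 1
--         symm_site[symm[idx]] = list(range(idx, j))
--         idx = j
--     return symm_site
-- ===== Notes on version B (the rewrite author's own statement) =====
-- stated objective: simpler
-- what changed: B replaces A's element-wise accumulator loop (last/store state, dict flush on value change plus a final flush after the loop) by a two-pointer scan that finds each maximal run [idx, j) directly and assigns its index range in one step. (Pre_ excludes only the empty mapping, where A raises IndexError; B returns {} there).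
import Mathlib
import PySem

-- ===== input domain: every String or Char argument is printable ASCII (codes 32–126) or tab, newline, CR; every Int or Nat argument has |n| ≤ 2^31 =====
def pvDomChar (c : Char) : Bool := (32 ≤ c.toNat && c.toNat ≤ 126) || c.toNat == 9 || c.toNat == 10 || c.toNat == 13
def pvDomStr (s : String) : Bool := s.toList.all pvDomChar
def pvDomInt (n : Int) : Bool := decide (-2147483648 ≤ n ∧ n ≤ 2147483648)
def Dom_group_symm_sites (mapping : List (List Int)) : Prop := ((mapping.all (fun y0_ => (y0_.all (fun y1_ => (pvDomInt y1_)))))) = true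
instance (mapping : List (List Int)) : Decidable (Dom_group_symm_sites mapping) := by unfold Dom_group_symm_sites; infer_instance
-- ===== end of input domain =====

-- B is a two-pointer run scan instead of A's accumulator loop; return-value equivalence on nonempty mapping.

-- ===== PORT A =====
-- loop body of A: state = (last, store, symm_site), element = (i, s) from enumerate(symm)
def pvStepA (st : Int × List Int × PySem.Dict Int (List Int)) (p : Int × Int) :
    Int × List Int × PySem.Dict Int (List Int) :=
  if p.2 == st.1 then (st.1, st.2.1 ++ [p.1], st.2.2)
  else (p.2, [p.1], st.2.2.insert st.1 st.2.1)

def group_symm_sites (mapping : List (List Int)) : List (Int × List Int) :=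
  let symm : List Int := mapping.map (fun i => (i.length : Int))
  match symm with
  | [] => []  -- Python raises IndexError at symm[0]; excluded by Pre_
  | s0 :: _ =>
    -- after each iteration the state's `last` equals the loop variable `s`,
    -- so the trailing `symm_site[s] = store` is the final insert below
    let st := (PySem.List.enumerate symm 0).foldl pvStepA (s0, [], PySem.Dict.empty)
    (st.2.2.insert st.1 st.2.1).items

-- ===== PORT B =====
-- the outer while-loop of B over the suffix of symm starting at idx:
-- the inner while finds the maximal run, here via takeWhile/dropWhile on the suffix
def pvRunsGo : List Int → Int → PySem.Dict Int (List Int) → PySem.Dict Int (List Int)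
  | [], _, d => d
  | x :: xs, idx, d =>
    let run := xs.takeWhile (· == x)
    pvRunsGo (xs.dropWhile (· == x)) (idx + run.length + 1)
      (d.insert x (PySem.List.pyRange idx (idx + run.length + 1) 1))
  termination_by l _ _ => l.length
  decreasing_by
    simpa using Nat.lt_succ_of_le (List.length_dropWhile_le _ _)

def group_symm_sites_alt (mapping : List (List Int)) : List (Int × List Int) :=
  let symm : List Int := mapping.map (fun i => (i.length : Int))
  (pvRunsGo symm 0 PySem.Dict.empty).items

-- ===== PRECONDITION & SPEC =====
-- Pre_ excludes only the empty mapping, on which A raises IndexError (symm[0]).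
def Pre_group_symm_sites (mapping : List (List Int)) : Prop := mapping ≠ []
instance (mapping : List (List Int)) : Decidable (Pre_group_symm_sites mapping) := by
  unfold Pre_group_symm_sites; infer_instance
def pvWitness_group_symm_sites : List (List Int) := [[1], [2, 3], [4, 5], [6]]

def Spec_group_symm_sites (mapping : List (List Int)) (out : List (Int × List Int)) : Prop := out = group_symm_sites_alt mapping
instance (mapping : List (List Int)) (out : List (Int × List Int)) : Decidable (Spec_group_symm_sites mapping out) := by unfold Spec_group_symm_sites; infer_instance

-- ===== CLAIM (what is proved, stated in full; the proofs are below) =====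
def Claim_equal_group_symm_sites : Prop := ∀ (mapping : List (List Int)), Dom_group_symm_sites mapping → Pre_group_symm_sites mapping → Spec_group_symm_sites mapping (group_symm_sites mapping)

-- ===== LEMMAS AND PROOFS =====

theorem pv_takeWhile_replicate (last : Int) (l : List Int)
    (hl : ∀ y ∈ l.head?, ¬ y = last) :
    ∀ m : Nat, (List.replicate m last ++ l).takeWhile (· == last) = List.replicate m last ∧
      (List.replicate m last ++ l).dropWhile (· == last) = l := by
  intro m
  induction m with
  | zero =>
    simp only [List.replicate, List.nil_append]
    cases l with
    | nil => simp
    | cons y ys =>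
      have hb : (y == last) = false := by simpa using hl y (by simp)
      simp [List.takeWhile, List.dropWhile, hb]
  | succ n ih =>
    simp only [List.replicate_succ, List.cons_append, List.takeWhile, List.dropWhile,
      BEq.rfl]
    exact ⟨by rw [ih.1], ih.2⟩

theorem pv_runsGo_replicate (last : Int) (l : List Int)
    (hl : ∀ y ∈ l.head?, ¬ y = last) (m : Nat) (hm : 0 < m) (i : Int)
    (d : PySem.Dict Int (List Int)) :
    pvRunsGo (List.replicate m last ++ l) i d
      = pvRunsGo l (i + m) (d.insert last (PySem.List.pyRange i (i + m) 1)) := by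
  obtain ⟨m', rfl⟩ : ∃ m', m = m' + 1 := ⟨m - 1, by omega⟩
  rw [List.replicate_succ, List.cons_append, pvRunsGo]
  rw [(pv_takeWhile_replicate last l hl m').1, (pv_takeWhile_replicate last l hl m').2]
  simp only [List.length_replicate, Nat.cast_add, Nat.cast_one, ← add_assoc]

-- core invariant: A has consumed indices < k, is inside a run of value `last`
-- whose members so far are exactly pyRange i k 1; B has consumed the runs before index i.
def pvFinish (st : Int × List Int × PySem.Dict Int (List Int)) : PySem.Dict Int (List Int) :=
  st.2.2.insert st.1 st.2.1

theorem pv_core (l : List Int) : ∀ (i k : Int) (last : Int)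
    (d : PySem.Dict Int (List Int)), i < k →
    pvFinish ((PySem.List.enumerate l k).foldl pvStepA (last, PySem.List.pyRange i k 1, d))
      = pvRunsGo (List.replicate (k - i).toNat last ++ l) i d := by
  induction l with
  | nil =>
    intro i k last d hik
    have h := pv_runsGo_replicate last [] (by simp) (k - i).toNat (by omega) i d
    simp only [List.append_nil] at h ⊢
    rw [h]
    have : i + ((k - i).toNat : Int) = k := by omega
    rw [this]
    simp only [PySem.List.enumerate_nil, List.foldl_nil, pvFinish, pvRunsGo]
  | cons x xs ih =>
    intro i k last d hik
    rw [PySem.List.enumerate_cons, List.foldl_cons]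
    by_cases hx : x = last
    · have hstep : pvStepA (last, PySem.List.pyRange i k 1, d) (k, x)
          = (last, PySem.List.pyRange i (k + 1) 1, d) := by
        simp only [pvStepA, hx, BEq.rfl, if_true]
        rw [PySem.List.pyRange_one_succ_right (by omega)]
      rw [hstep, ih i (k + 1) last d (by omega)]
      congr 1
      have h1 : (k + 1 - i).toNat = (k - i).toNat + 1 := by omega
      rw [h1, List.replicate_succ' , hx]
      simp
    · have hstep : pvStepA (last, PySem.List.pyRange i k 1, d) (k, x)
          = (x, PySem.List.pyRange k (k + 1) 1, d.insert last (PySem.List.pyRange i k 1)) := by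
        simp only [pvStepA]
        rw [if_neg (by simpa using hx)]
        rw [PySem.List.pyRange_one_singleton]
      rw [hstep, ih k (k + 1) x _ (by omega)]
      rw [pv_runsGo_replicate last (x :: xs) (by simpa using hx) _ (by omega) i d]
      have h1 : i + ((k - i).toNat : Int) = k := by omega
      rw [h1]
      congr 1
      simp

theorem group_symm_sites_spec : Claim_equal_group_symm_sites := by
  intro mapping _ hpre
  unfold Spec_group_symm_sites group_symm_sites group_symm_sites_alt
  cases mapping with
  | nil => exact absurd rfl hpre
  | cons m0 ms =>
    simp only [List.map_cons]
    set s0 : Int := (m0.length : Int)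
    set rest : List Int := ms.map (fun i => (i.length : Int))
    rw [PySem.List.enumerate_cons, List.foldl_cons]
    have hstep : pvStepA (s0, [], PySem.Dict.empty) (0, s0)
        = (s0, PySem.List.pyRange 0 1 1, PySem.Dict.empty) := by
      simp only [pvStepA, BEq.rfl, if_true, List.nil_append]
      rw [show (PySem.List.pyRange 0 1 1) = [0] by decide]
    rw [hstep]
    have h := pv_core rest 0 1 s0 PySem.Dict.empty (by omega)
    norm_num [List.replicate, List.singleton_append, pvFinish] at h ⊢
    rw [h]
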